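-- pv_equiv track=rewrite | github.com/mountainash-io/mountainash | src/mountainash/utils/graph/algorithms.py | parallel_layers
-- ===== SOURCE A (Python) =====
-- def parallel_layers(
--     edges: set[tuple[str, str]],
--     order: list[str],
-- ) -> list[list[str]]:
--     """Group nodes into parallel layers from a topological order.
--
--     Nodes in the same layer have no dependencies on each other
--     and can execute concurrently.
--
--     Args:
--         edges: Set of (upstream, downstream) tuples.
--         order: A valid topological ordering of the nodes.
--
--     Returns:
--         List of layers, where each layer is a list of node names.
--     """
--     order_set = set(order)
--     upstream_of: dict[str, list[str]] = {}
--     for up, down in edges: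
--         if up in order_set and down in order_set:
--             upstream_of.setdefault(down, []).append(up)
--
--     depth: dict[str, int] = {}
--     for name in order:
--         deps = upstream_of.get(name, [])
--         if not deps:
--             depth[name] = 0
--         else:
--             depth[name] = max(depth[d] for d in deps) + 1
--
--     if not depth:
--         return []
--
--     max_depth = max(depth.values())
--     layers: list[list[str]] = [[] for _ in range(max_depth + 1)]
--     for name in order:
--         layers[depth[name]].append(name)
--
--     return layers
-- ===== SOURCE B (Python) =====
-- def parallel_layers(
--     edges: set[tuple[str, str]],
--     order: list[str],
-- ) -> list[list[str]]:
--     """Group nodes into parallel layers by forward relaxation over out-edges."""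
--     if not order:
--         return []
--     nodes = set(order)
--     downstream_of: dict[str, list[str]] = {}
--     for up, down in edges:
--         if up in nodes and down in nodes:
--             downstream_of.setdefault(up, []).append(down)
--     depth = {name: 0 for name in order}
--     for name in order:
--         base = depth[name] + 1
--         for down in downstream_of.get(name, []):
--             if depth[down] < base:
--                 depth[down] = base
--     max_depth = max(depth.values())
--     return [[n for n in order if depth[n] == d] for d in range(max_depth + 1)]
-- ===== Notes on version B (the rewrite author's own statement) =====
-- stated objective: alternative
-- what changed: Replaces the pull-based depth computation (each node takes max over an upstream adjacency map of already-computed depths) by push-based forward relaxation over a downstream adjacency map, and buckets layers by per-level comprehension instead of indexed appends.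
import Mathlib
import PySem

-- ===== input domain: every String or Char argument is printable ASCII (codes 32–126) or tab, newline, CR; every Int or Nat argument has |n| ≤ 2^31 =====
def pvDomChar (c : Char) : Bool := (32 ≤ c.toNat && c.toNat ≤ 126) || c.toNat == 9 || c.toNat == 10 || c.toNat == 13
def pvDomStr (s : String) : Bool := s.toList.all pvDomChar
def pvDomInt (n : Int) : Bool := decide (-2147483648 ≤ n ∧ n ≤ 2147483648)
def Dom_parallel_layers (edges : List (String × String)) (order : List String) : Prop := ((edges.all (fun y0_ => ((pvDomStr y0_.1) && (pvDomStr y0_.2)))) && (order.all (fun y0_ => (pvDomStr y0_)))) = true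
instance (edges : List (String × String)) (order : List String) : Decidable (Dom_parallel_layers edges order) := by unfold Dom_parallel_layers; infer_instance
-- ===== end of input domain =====

-- B replaces A's pull-based depth computation (max over upstream deps) by push-based
-- forward relaxation over a downstream adjacency map, with per-level comprehension bucketing
-- ("alternative": a different decomposition of the same cost).


-- ===== PORT A =====
-- upstream_of: for up, down in edges: if both in order_set: upstream_of.setdefault(down, []).append(up)
def pvUpstream (edges : List (String × String)) (order : List String) : PySem.Dict String (List String) :=
  edges.foldl (fun d p =>
    if (PySem.Set.ofList order).contains p.1 && (PySem.Set.ofList order).contains p.2 then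
      d.modify p.2 [] (· ++ [p.1])
    else d) PySem.Dict.empty

-- one iteration of A's depth loop; Python raises KeyError when a dep is not yet in depth —
-- Pre_ excludes exactly those inputs, so getD there is only evaluated on present keys
def pvDepthStepA (up : PySem.Dict String (List String)) (dep : PySem.Dict String Int)
    (name : String) : PySem.Dict String Int :=
  match up.getD name [] with
  | [] => dep.insert name 0
  | d0 :: t => dep.insert name (t.foldl (fun m u => max m (dep.getD u 0)) (dep.getD d0 0) + 1)

-- layers[depth[name]].append(name); depth values are always ≥ 0 and ≤ max_depth, so the
-- index is in range and toNat is exact here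
def pvBucketStepA (dep : PySem.Dict String Int) (ls : List (List String)) (name : String) :
    List (List String) :=
  let i := (dep.getD name 0).toNat
  ls.set i (ls.getD i [] ++ [name])

def parallel_layers (edges : List (String × String)) (order : List String) : List (List String) :=
  let up := pvUpstream edges order
  let dep := order.foldl (pvDepthStepA up) PySem.Dict.empty
  if dep.items.isEmpty then [] else
  -- max(depth.values()): the list is nonempty here, the [] branch is unreachable
  let maxd : Int := match dep.values with | [] => 0 | v :: t => t.foldl max v
  order.foldl (pvBucketStepA dep) ((PySem.List.pyRange 0 (maxd + 1) 1).map (fun _ => []))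

-- ===== PORT B =====
-- downstream_of: for up, down in edges: if both in nodes: downstream_of.setdefault(up, []).append(down)
def pvDownstream (edges : List (String × String)) (order : List String) : PySem.Dict String (List String) :=
  edges.foldl (fun d p =>
    if (PySem.Set.ofList order).contains p.1 && (PySem.Set.ofList order).contains p.2 then
      d.modify p.1 [] (· ++ [p.2])
    else d) PySem.Dict.empty

-- inner relaxation: for down in ds: if depth[down] < base: depth[down] = base
def pvRelax (base : Int) (dep : PySem.Dict String Int) (ds : List String) : PySem.Dict String Int :=
  ds.foldl (fun dep down => if dep.getD down 0 < base then dep.insert down base else dep) dep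

def parallel_layers_alt (edges : List (String × String)) (order : List String) : List (List String) :=
  if order.isEmpty then [] else
  let dn := pvDownstream edges order
  let dep0 : PySem.Dict String Int := order.foldl (fun d n => d.insert n 0) PySem.Dict.empty
  let dep := order.foldl (fun dep name => pvRelax (dep.getD name 0 + 1) dep (dn.getD name [])) dep0
  -- max(depth.values()): nonempty here (order ≠ [])
  let maxd : Int := match dep.values with | [] => 0 | v :: t => t.foldl max v
  (PySem.List.pyRange 0 (maxd + 1) 1).map (fun d => order.filter (fun n => dep.getD n 0 == d))

-- ===== PRECONDITION & SPEC =====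
-- Pre_ excludes exactly the inputs where A raises KeyError: a kept edge (u, d) whose
-- upstream u does not occur strictly before the first occurrence of d in order.
def Pre_parallel_layers (edges : List (String × String)) (order : List String) : Prop :=
  ∀ p ∈ edges, p.1 ∈ order → p.2 ∈ order → order.idxOf p.1 < order.idxOf p.2
instance (edges : List (String × String)) (order : List String) : Decidable (Pre_parallel_layers edges order) := by unfold Pre_parallel_layers; infer_instance

def pvWitness_parallel_layers : (List (String × String)) × List String :=
  ([("a", "b"), ("a", "c"), ("b", "d"), ("c", "d")], ["a", "b", "c", "d"])


def Spec_parallel_layers (edges : List (String × String)) (order : List String) (out : List (List String)) : Prop := out = parallel_layers_alt edges order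
instance (edges : List (String × String)) (order : List String) (out : List (List String)) : Decidable (Spec_parallel_layers edges order out) := by unfold Spec_parallel_layers; infer_instance

-- ===== CLAIM (what is proved, stated in full; the proofs are below) =====
def Claim_equal_parallel_layers : Prop := ∀ (edges : List (String × String)) (order : List String), Dom_parallel_layers edges order → Pre_parallel_layers edges order → Spec_parallel_layers edges order (parallel_layers edges order)

-- ===== LEMMAS AND PROOFS =====


-- proof-side helpers: the filtered edge list, upstream/downstream neighbour lists,
-- and the canonical depth function (fuel-indexed by position in order)
def pvE (edges : List (String × String)) (order : List String) : List (String × String) :=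
  edges.filter (fun p => (PySem.Set.ofList order).contains p.1 && (PySem.Set.ofList order).contains p.2)

def pvUpsL (edges : List (String × String)) (order : List String) (x : String) : List String :=
  ((pvE edges order).filter (fun p => p.2 == x)).map (·.1)

def pvDnsL (edges : List (String × String)) (order : List String) (x : String) : List String :=
  ((pvE edges order).filter (fun p => p.1 == x)).map (·.2)

def pvFuel (edges : List (String × String)) (order : List String) : Nat → String → Int
  | 0, _ => 0
  | k+1, x => (pvUpsL edges order x).foldl (fun m u => max m (pvFuel edges order k u + 1)) 0

def pvD (edges : List (String × String)) (order : List String) (x : String) : Int :=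
  pvFuel edges order (order.idxOf x + 1) x

-- partial depth reached by B's relaxation after processing the prefix pr of order
def pvP (edges : List (String × String)) (order pr : List String) (x : String) : Int :=
  ((pvUpsL edges order x).filter (fun u => decide (u ∈ pr))).foldl
    (fun m u => max m (pvD edges order u + 1)) 0

lemma pvE_mem {edges : List (String × String)} {order : List String} {p : String × String} :
    p ∈ pvE edges order ↔ p ∈ edges ∧ p.1 ∈ order ∧ p.2 ∈ order := by
  simp [pvE, List.mem_filter, PySem.Set.mem_ofList]

lemma pvUpsL_mem {edges : List (String × String)} {order : List String} {x u : String} :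
    u ∈ pvUpsL edges order x ↔ (u, x) ∈ pvE edges order := by
  constructor
  · intro h
    simp only [pvUpsL, List.mem_map, List.mem_filter] at h
    obtain ⟨p, ⟨hp, hx⟩, hu⟩ := h
    have : p = (u, x) := by
      cases p; simp_all
    rwa [this] at hp
  · intro h
    simp only [pvUpsL, List.mem_map, List.mem_filter]
    exact ⟨(u, x), ⟨h, by simp⟩, rfl⟩

lemma pvDnsL_mem {edges : List (String × String)} {order : List String} {x u : String} :
    x ∈ pvDnsL edges order u ↔ (u, x) ∈ pvE edges order := by
  constructor
  · intro h
    simp only [pvDnsL, List.mem_map, List.mem_filter] at h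
    obtain ⟨p, ⟨hp, hx⟩, hu⟩ := h
    have : p = (u, x) := by
      cases p; simp_all
    rwa [this] at hp
  · intro h
    simp only [pvDnsL, List.mem_map, List.mem_filter]
    exact ⟨(u, x), ⟨h, by simp⟩, rfl⟩

lemma pvPre_lt {edges : List (String × String)} {order : List String}
    (hPre : Pre_parallel_layers edges order) {p : String × String}
    (hp : p ∈ pvE edges order) : order.idxOf p.1 < order.idxOf p.2 := by
  obtain ⟨h1, h2, h3⟩ := pvE_mem.mp hp
  exact hPre p h1 h2 h3

lemma pvFoldl_max_le {α : Type} (l : List α) (g : α → Int) (a b : Int)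
    (ha : a ≤ b) (h : ∀ u ∈ l, g u ≤ b) :
    l.foldl (fun m u => max m (g u)) a ≤ b := by
  induction l generalizing a with
  | nil => exact ha
  | cons u t ih =>
      exact ih _ (max_le ha (h u List.mem_cons_self)) (fun v hv => h v (List.mem_cons_of_mem _ hv))

lemma pvFuel_nonneg (edges : List (String × String)) (order : List String) (k : Nat) (x : String) :
    0 ≤ pvFuel edges order k x := by
  cases k with
  | zero => simp [pvFuel]
  | succ k => exact (PySem.List.le_foldl_max_int _ _ 0).1

lemma pvD_nonneg (edges : List (String × String)) (order : List String) (x : String) :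
    0 ≤ pvD edges order x := pvFuel_nonneg edges order _ x

lemma pvFuel_stab {edges : List (String × String)} {order : List String}
    (hPre : Pre_parallel_layers edges order) :
    ∀ (r : Nat) (x : String), x ∈ order → order.idxOf x ≤ r →
      ∀ n, order.idxOf x < n → pvFuel edges order n x = pvD edges order x := by
  intro r
  induction r with
  | zero =>
      intro x hx hr n hn
      have hempty : pvUpsL edges order x = [] := by
        apply List.eq_nil_iff_forall_not_mem.mpr
        intro u hu
        have := pvPre_lt hPre (pvUpsL_mem.mp hu)
        simp at this; omega
      obtain ⟨m, rfl⟩ : ∃ m, n = m + 1 := ⟨n - 1, by omega⟩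
      have hr0 : order.idxOf x = 0 := by omega
      simp [pvFuel, hempty, pvD, hr0]
  | succ r ih =>
      intro x hx hr n hn
      obtain ⟨m, rfl⟩ : ∃ m, n = m + 1 := ⟨n - 1, by omega⟩
      have key : ∀ (k : Nat), order.idxOf x ≤ k →
          (pvUpsL edges order x).foldl (fun m u => max m (pvFuel edges order k u + 1)) 0
          = (pvUpsL edges order x).foldl (fun m u => max m (pvD edges order u + 1)) 0 := by
        intro k hk
        apply PySem.List.foldl_congr_mem
        intro acc u hu
        have hlt := pvPre_lt hPre (pvUpsL_mem.mp hu)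
        simp only at hlt
        have humem : u ∈ order := (pvE_mem.mp (pvUpsL_mem.mp hu)).2.1
        rw [ih u humem (by omega) k (by omega)]
      show (pvUpsL edges order x).foldl (fun acc u => max acc (pvFuel edges order m u + 1)) 0 = _
      rw [key m (by omega), show pvD edges order x = (pvUpsL edges order x).foldl
        (fun acc u => max acc (pvFuel edges order (order.idxOf x) u + 1)) 0 from rfl,
        key (order.idxOf x) (le_refl _)]

lemma pvD_eq {edges : List (String × String)} {order : List String}
    (hPre : Pre_parallel_layers edges order) {x : String} (hx : x ∈ order) :
    pvD edges order x
      = (pvUpsL edges order x).foldl (fun m u => max m (pvD edges order u + 1)) 0 := by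
  rw [show pvD edges order x = (pvUpsL edges order x).foldl
      (fun acc u => max acc (pvFuel edges order (order.idxOf x) u + 1)) 0 from rfl]
  apply PySem.List.foldl_congr_mem
  intro acc u hu
  have hlt := pvPre_lt hPre (pvUpsL_mem.mp hu)
  simp only at hlt
  have humem : u ∈ order := (pvE_mem.mp (pvUpsL_mem.mp hu)).2.1
  rw [pvFuel_stab hPre (order.idxOf u) u humem (le_refl _) (order.idxOf x) hlt]


-- the adjacency dicts look up to the neighbour lists
lemma pvUpstream_getD (edges : List (String × String)) (order : List String) (x : String) :
    (pvUpstream edges order).getD x [] = pvUpsL edges order x := by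
  unfold pvUpstream
  rw [PySem.List.foldl_if_eq_foldl_filter]
  have : (pvE edges order).foldl (fun d p => d.modify p.2 [] (· ++ [p.1])) PySem.Dict.empty
      = ((pvE edges order).map Prod.swap).foldl (fun d p => d.modify p.1 [] (· ++ [p.2]))
          PySem.Dict.empty := by
    rw [List.foldl_map]
    apply PySem.List.foldl_congr_mem
    intro acc p _
    rfl
  rw [show (edges.filter fun p => (PySem.Set.ofList order).contains p.1
        && (PySem.Set.ofList order).contains p.2) = pvE edges order from rfl, this,
    PySem.Dict.getD_foldl_modify_append]
  simp [pvUpsL, PySem.Dict.getD_empty, List.filter_map, Function.comp_def, Prod.swap]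

lemma pvDownstream_getD (edges : List (String × String)) (order : List String) (x : String) :
    (pvDownstream edges order).getD x [] = pvDnsL edges order x := by
  unfold pvDownstream
  rw [PySem.List.foldl_if_eq_foldl_filter,
    show (edges.filter fun p => (PySem.Set.ofList order).contains p.1
        && (PySem.Set.ofList order).contains p.2) = pvE edges order from rfl,
    PySem.Dict.getD_foldl_modify_append]
  simp [pvDnsL, PySem.Dict.getD_empty]

-- facts about dicts whose items list is ks.map (fun x => (x, f x)) with ks nodup
lemma pvShape_keys {ν : Type} (d : PySem.Dict String ν) (ks : List String) (f : String → ν)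
    (h : d.items = ks.map (fun x => (x, f x))) : d.keys = ks := by
  simp [PySem.Dict.keys, h, List.map_map, Function.comp_def]

lemma pvShape_getD {ν : Type} (d : PySem.Dict String ν) (ks : List String) (f : String → ν)
    (d0 : ν) (h : d.items = ks.map (fun x => (x, f x))) (hnd : ks.Nodup) {x : String}
    (hx : x ∈ ks) : d.getD x d0 = f x := by
  have hmem : (x, f x) ∈ d.items := by
    rw [h]; exact List.mem_map.mpr ⟨x, hx, rfl⟩
  exact PySem.Dict.getD_of_mem_items d hmem (by rw [pvShape_keys d ks f h]; exact hnd) d0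

lemma pvShape_contains {ν : Type} (d : PySem.Dict String ν) (ks : List String) (f : String → ν)
    (h : d.items = ks.map (fun x => (x, f x))) {x : String} (hx : x ∈ ks) :
    d.contains x = true := by
  rw [PySem.Dict.contains_iff_mem_keys, pvShape_keys d ks f h]; exact hx

lemma pvShape_insert {ν : Type} (d : PySem.Dict String ν) (ks : List String) (f : String → ν)
    (h : d.items = ks.map (fun x => (x, f x))) {x : String} (hx : x ∈ ks) (v : ν) :
    (d.insert x v).items = ks.map (fun y => (y, if y = x then v else f y)) := by
  rw [PySem.Dict.items_insert_of_contains d v (pvShape_contains d ks f h hx), h, List.map_map]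
  apply List.map_congr_left
  intro y _
  by_cases hyx : y = x
  · subst hyx; simp
  · simp [hyx]

-- a fresh insert appends
lemma pvShape_insert_fresh {ν : Type} (d : PySem.Dict String ν) (ks : List String) (f : String → ν)
    (h : d.items = ks.map (fun x => (x, f x))) {x : String} (hx : ¬ x ∈ ks) (v : ν)
    (g : String → ν) (hg : ∀ y ∈ ks, g y = f y) (hgx : g x = v) :
    (d.insert x v).items = (ks ++ [x]).map (fun y => (y, g y)) := by
  have hc : d.contains x = false := by
    rw [show d.contains x = decide (x ∈ d.keys) from PySem.Dict.contains_eq_decide_mem_keys d x,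
      pvShape_keys d ks f h]
    simpa using hx
  rw [PySem.Dict.items_insert_of_not_contains d v hc, h]
  simp only [List.map_append, List.map_cons, List.map_nil, hgx]
  congr 1
  apply List.map_congr_left
  intro y hy
  rw [hg y hy]

lemma pvFold_shift {α : Type} (l : List α) (g : α → Int) (a : Int) :
    l.foldl (fun m u => max m (g u + 1)) (a + 1) = l.foldl (fun m u => max m (g u)) a + 1 := by
  induction l generalizing a with
  | nil => rfl
  | cons u t ih =>
      simp only [List.foldl_cons]
      rw [show max (a + 1) (g u + 1) = max a (g u) + 1 from max_add_add_right a (g u) 1, ih]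

-- index facts used for "all upstreams of the current node are already processed"
lemma pvIdx_le (pr rest : List String) (name : String) :
    (pr ++ name :: rest).idxOf name ≤ pr.length := by
  induction pr with
  | nil => simp [List.idxOf_cons]
  | cons a t ih =>
      simp only [List.cons_append, List.idxOf_cons, List.length_cons]
      by_cases h : a == name
      · simp [h]
      · simp only [h, cond_false]
        omega

lemma pvMem_prefix {order pr tail : List String} (h : order = pr ++ tail) {u : String}
    (hu : u ∈ order) (hlt : order.idxOf u < pr.length) : u ∈ pr := by
  have hl : order.idxOf u < order.length := List.idxOf_lt_length_of_mem hu
  have hget : order[order.idxOf u] = u := List.getElem_idxOf hl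
  subst h
  rw [List.getElem_append_left hlt] at hget
  exact hget ▸ List.getElem_mem _


lemma pvDedup_append (pr : List String) (n : String) :
    PySem.List.dedup (pr ++ [n])
      = if n ∈ pr then PySem.List.dedup pr else PySem.List.dedup pr ++ [n] := by
  simp only [PySem.List.dedup_eq_ofList, PySem.Set.ofList_append_singleton, PySem.Set.add]
  by_cases h : n ∈ pr
  · simp [List.contains_iff_mem, PySem.Set.mem_ofList, h]
  · simp [List.contains_iff_mem, PySem.Set.mem_ofList, h]

lemma pvDedup_eq_nil_iff (l : List String) : PySem.List.dedup l = [] ↔ l = [] := by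
  cases l with
  | nil => simp [PySem.List.dedup_eq_ofList, PySem.Set.ofList_nil]
  | cons a t =>
      simp only [iff_false, reduceCtorEq]
      intro h
      have : a ∈ PySem.List.dedup (a :: t) := (PySem.List.mem_dedup _ _).mpr List.mem_cons_self
      rw [h] at this
      exact absurd this (List.not_mem_nil)

-- A's depth-loop body, under the invariant, is an insert of the canonical depth
lemma pvStepA_eq {edges : List (String × String)} {order : List String}
    (hPre : Pre_parallel_layers edges order) {pr rest : List String} {name : String}
    (horder : order = pr ++ name :: rest) {dep : PySem.Dict String Int}
    (hdep : dep.items = (PySem.List.dedup pr).map (fun x => (x, pvD edges order x))) :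
    pvDepthStepA (pvUpstream edges order) dep name = dep.insert name (pvD edges order name) := by
  have hname : name ∈ order := by rw [horder]; simp
  have hget : ∀ u ∈ pvUpsL edges order name, dep.getD u 0 = pvD edges order u := by
    intro u hu
    have hlt := pvPre_lt hPre (pvUpsL_mem.mp hu)
    simp only at hlt
    have humem : u ∈ order := (pvE_mem.mp (pvUpsL_mem.mp hu)).2.1
    have hle : order.idxOf name ≤ pr.length := horder ▸ pvIdx_le pr rest name
    have hupr : u ∈ pr := pvMem_prefix horder humem (by omega)
    exact pvShape_getD dep _ _ 0 hdep (PySem.List.nodup_dedup _) ((PySem.List.mem_dedup _ _).mpr hupr)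
  have hDeq := pvD_eq hPre hname
  unfold pvDepthStepA
  rw [pvUpstream_getD]
  cases h : pvUpsL edges order name with
  | nil =>
      dsimp only
      rw [h] at hDeq
      simp only [List.foldl_nil] at hDeq
      rw [← hDeq]
  | cons d0 t =>
      dsimp only
      rw [h] at hDeq
      simp only [List.foldl_cons] at hDeq
      have h0 : max (0 : Int) (pvD edges order d0 + 1) = pvD edges order d0 + 1 :=
        max_eq_right (by have := pvD_nonneg edges order d0; omega)
      rw [h0, pvFold_shift] at hDeq
      congr 1
      have hcong := PySem.List.foldl_congr_mem t (fun m u => max m (dep.getD u 0))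
        (fun m u => max m (pvD edges order u)) (dep.getD d0 0)
        (fun acc u hu => by simp only []; rw [hget u (by rw [h]; exact List.mem_cons_of_mem _ hu)])
      rw [hcong, hget d0 (by rw [h]; exact List.mem_cons_self), hDeq]

lemma pvA_loop {edges : List (String × String)} {order : List String}
    (hPre : Pre_parallel_layers edges order) :
    ∀ (rest pr : List String) (dep : PySem.Dict String Int),
      order = pr ++ rest →
      dep.items = (PySem.List.dedup pr).map (fun x => (x, pvD edges order x)) →
      (rest.foldl (pvDepthStepA (pvUpstream edges order)) dep).items
        = (PySem.List.dedup order).map (fun x => (x, pvD edges order x)) := by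
  intro rest
  induction rest with
  | nil =>
      intro pr dep horder hdep
      simp only [List.foldl_nil]
      rw [hdep, horder, List.append_nil]
  | cons name rest' ih =>
      intro pr dep horder hdep
      simp only [List.foldl_cons]
      rw [pvStepA_eq hPre horder hdep]
      apply ih (pr ++ [name]) _ (by rw [horder, List.append_assoc]; rfl)
      rw [pvDedup_append]
      by_cases hmem : name ∈ pr
      · simp only [hmem, if_true]
        rw [pvShape_insert dep _ _ hdep ((PySem.List.mem_dedup _ _).mpr hmem)]
        apply List.map_congr_left
        intro y _
        by_cases hy : y = name
        · subst hy; simp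
        · simp [hy]
      · simp only [hmem, if_false]
        exact pvShape_insert_fresh dep _ _ hdep (fun h => hmem ((PySem.List.mem_dedup _ _).mp h)) _
          (fun x => pvD edges order x) (fun y _ => rfl) rfl


-- relaxation with a fixed base updates exactly the listed targets to the max
lemma pvRelax_items {order : List String} :
    ∀ (ds : List String) (g : String → Int) (dep : PySem.Dict String Int) (b : Int),
      dep.items = (PySem.List.dedup order).map (fun x => (x, g x)) →
      (∀ d ∈ ds, d ∈ order) →
      (pvRelax b dep ds).items
        = (PySem.List.dedup order).map (fun x => (x, if x ∈ ds then max (g x) b else g x)) := by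
  intro ds
  induction ds with
  | nil =>
      intro g dep b hdep _
      simp only [pvRelax, List.foldl_nil, hdep]
      apply List.map_congr_left
      intro y _
      simp
  | cons d ds' ih =>
      intro g dep b hdep hsub
      have hd : d ∈ order := hsub d List.mem_cons_self
      have hget : dep.getD d 0 = g d :=
        pvShape_getD dep _ _ 0 hdep (PySem.List.nodup_dedup _) ((PySem.List.mem_dedup _ _).mpr hd)
      show ((d :: ds').foldl (fun dep down => if dep.getD down 0 < b then dep.insert down b else dep) dep).items = _
      simp only [List.foldl_cons]
      by_cases hlt : dep.getD d 0 < b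
      · simp only [hlt, if_true]
        have hins := pvShape_insert dep _ _ hdep ((PySem.List.mem_dedup _ _).mpr hd) b
        have := ih (fun y => if y = d then b else g y) (dep.insert d b) b hins
          (fun x hx => hsub x (List.mem_cons_of_mem _ hx))
        rw [show (ds'.foldl (fun dep down => if dep.getD down 0 < b then dep.insert down b else dep) (dep.insert d b)) = pvRelax b (dep.insert d b) ds' from rfl, this]
        apply List.map_congr_left
        intro y _
        by_cases hyd : y = d
        · subst hyd
          rw [hget] at hlt
          by_cases hyds : y ∈ ds' <;> simp [hyds] <;> omega
        · by_cases hyds : y ∈ ds' <;> simp [hyd, hyds]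
      · simp only [hlt, if_false]
        have := ih g dep b hdep (fun x hx => hsub x (List.mem_cons_of_mem _ hx))
        rw [show (ds'.foldl (fun dep down => if dep.getD down 0 < b then dep.insert down b else dep) dep) = pvRelax b dep ds' from rfl, this]
        apply List.map_congr_left
        intro y _
        by_cases hyd : y = d
        · subst hyd
          rw [hget] at hlt
          by_cases hyds : y ∈ ds' <;> simp [hyds] <;> omega
        · by_cases hyds : y ∈ ds' <;> simp [hyd, hyds]

lemma pvP_nil (edges : List (String × String)) (order : List String) (x : String) :
    pvP edges order [] x = 0 := by
  simp [pvP]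

lemma pvP_nonneg (edges : List (String × String)) (order pr : List String) (x : String) :
    0 ≤ pvP edges order pr x := (PySem.List.le_foldl_max_int _ _ 0).1

lemma pvP_le_of_mem {edges : List (String × String)} {order pr : List String} {x u : String}
    (hu : u ∈ pvUpsL edges order x) (hpr : u ∈ pr) :
    pvD edges order u + 1 ≤ pvP edges order pr x := by
  have hmem : u ∈ (pvUpsL edges order x).filter (fun u => decide (u ∈ pr)) :=
    List.mem_filter.mpr ⟨hu, by simpa using hpr⟩
  exact (PySem.List.le_foldl_max_int _ _ 0).2 u hmem

lemma pvP_le {edges : List (String × String)} {order pr : List String} {x : String} {b : Int}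
    (h0 : 0 ≤ b) (h : ∀ u ∈ pvUpsL edges order x, u ∈ pr → pvD edges order u + 1 ≤ b) :
    pvP edges order pr x ≤ b := by
  apply pvFoldl_max_le _ _ 0 b h0
  intro u hu
  have := List.mem_filter.mp hu
  exact h u this.1 (by simpa using this.2)

-- after all upstreams of name are in pr, the partial depth of name is final
lemma pvP_full {edges : List (String × String)} {order : List String}
    (hPre : Pre_parallel_layers edges order) {pr rest : List String} {name : String}
    (horder : order = pr ++ name :: rest) :
    pvP edges order pr name = pvD edges order name := by
  have hname : name ∈ order := by rw [horder]; simp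
  have hsub : ∀ u ∈ pvUpsL edges order name, u ∈ pr := by
    intro u hu
    have hlt := pvPre_lt hPre (pvUpsL_mem.mp hu)
    simp only at hlt
    have humem : u ∈ order := (pvE_mem.mp (pvUpsL_mem.mp hu)).2.1
    have hle : order.idxOf name ≤ pr.length := horder ▸ pvIdx_le pr rest name
    exact pvMem_prefix horder humem (by omega)
  unfold pvP
  rw [List.filter_eq_self.mpr (fun u hu => by simpa using hsub u hu)]
  exact (pvD_eq hPre hname).symm

-- extending the processed prefix by name relaxes exactly name''s downstream targets
lemma pvP_step {edges : List (String × String)} {order : List String} (pr : List String)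
    (name x : String) :
    pvP edges order (pr ++ [name]) x
      = if x ∈ pvDnsL edges order name
        then max (pvP edges order pr x) (pvD edges order name + 1)
        else pvP edges order pr x := by
  have hiff : x ∈ pvDnsL edges order name ↔ name ∈ pvUpsL edges order x :=
    pvDnsL_mem.trans pvUpsL_mem.symm
  by_cases hmem : x ∈ pvDnsL edges order name
  · have hup : name ∈ pvUpsL edges order x := hiff.mp hmem
    simp only [hmem, if_true]
    apply le_antisymm
    · apply pvP_le
      · have := pvP_nonneg edges order pr x; omega
      · intro u hu hupr
        rcases List.mem_append.mp hupr with h | h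
        · exact le_trans (pvP_le_of_mem hu h) (le_max_left _ _)
        · have : u = name := by simpa using h
          subst this
          exact le_max_right _ _
    · apply max_le
      · apply pvP_le (pvP_nonneg edges order (pr ++ [name]) x)
        intro u hu hupr
        exact pvP_le_of_mem hu (List.mem_append.mpr (Or.inl hupr))
      · exact pvP_le_of_mem hup (List.mem_append.mpr (Or.inr List.mem_cons_self))
  · simp only [hmem, if_false]
    unfold pvP
    congr 1
    apply List.filter_congr
    intro u hu
    have hune : u ≠ name := by
      intro h; subst h; exact hmem (hiff.mpr hu)
    simp [hune]

-- B's initialisation loop: every node of order maps to 0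
lemma pvB_init :
    ∀ (l pr0 : List String) (dep : PySem.Dict String Int),
      dep.items = (PySem.List.dedup pr0).map (fun x => (x, (0 : Int))) →
      ((l.foldl (fun d n => d.insert n 0) dep)).items
        = (PySem.List.dedup (pr0 ++ l)).map (fun x => (x, (0 : Int))) := by
  intro l
  induction l with
  | nil =>
      intro pr0 dep hdep
      simpa using hdep
  | cons n l' ih =>
      intro pr0 dep hdep
      simp only [List.foldl_cons]
      have step : (dep.insert n 0).items
          = (PySem.List.dedup (pr0 ++ [n])).map (fun x => (x, (0 : Int))) := by
        rw [pvDedup_append]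
        by_cases hmem : n ∈ pr0
        · simp only [hmem, if_true]
          rw [pvShape_insert dep _ _ hdep ((PySem.List.mem_dedup _ _).mpr hmem)]
          apply List.map_congr_left
          intro y _
          by_cases hy : y = n <;> simp [hy]
        · simp only [hmem, if_false]
          exact pvShape_insert_fresh dep _ _ hdep (fun h => hmem ((PySem.List.mem_dedup _ _).mp h)) _
            (fun _ => (0 : Int)) (fun y _ => rfl) rfl
      have := ih (pr0 ++ [n]) (dep.insert n 0) step
      rwa [List.append_assoc] at this

-- B's relaxation loop carried over the whole order
lemma pvB_loop {edges : List (String × String)} {order : List String}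
    (hPre : Pre_parallel_layers edges order) :
    ∀ (rest pr : List String) (dep : PySem.Dict String Int),
      order = pr ++ rest →
      dep.items = (PySem.List.dedup order).map (fun x => (x, pvP edges order pr x)) →
      (rest.foldl (fun dep name =>
          pvRelax (dep.getD name 0 + 1) dep ((pvDownstream edges order).getD name [])) dep).items
        = (PySem.List.dedup order).map (fun x => (x, pvP edges order (pr ++ rest) x)) := by
  intro rest
  induction rest with
  | nil =>
      intro pr dep horder hdep
      simpa using hdep
  | cons name rest' ih =>
      intro pr dep horder hdep
      simp only [List.foldl_cons]
      have hname : name ∈ order := by rw [horder]; simp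
      have hget : dep.getD name 0 = pvD edges order name := by
        rw [pvShape_getD dep _ _ 0 hdep (PySem.List.nodup_dedup _)
          ((PySem.List.mem_dedup _ _).mpr hname)]
        exact pvP_full hPre horder
      have hsub : ∀ d ∈ (pvDownstream edges order).getD name [], d ∈ order := by
        rw [pvDownstream_getD]
        intro d hd
        exact (pvE_mem.mp (pvDnsL_mem.mp hd)).2.2
      have hrelax := pvRelax_items ((pvDownstream edges order).getD name [])
        (fun x => pvP edges order pr x) dep (dep.getD name 0 + 1) hdep hsub
      have hstep : (pvRelax (dep.getD name 0 + 1) dep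
            ((pvDownstream edges order).getD name [])).items
          = (PySem.List.dedup order).map (fun x => (x, pvP edges order (pr ++ [name]) x)) := by
        rw [hrelax]
        apply List.map_congr_left
        intro y _
        rw [pvP_step pr name y, hget, pvDownstream_getD]
      have := ih (pr ++ [name]) _ (by rw [horder, List.append_assoc]; rfl) hstep
      rwa [List.append_assoc] at this


lemma pvEmpty_items {ν : Type} : (PySem.Dict.empty : PySem.Dict String ν).items = [] := rfl

lemma pvSelf_map_range (L : List (List String)) :
    (List.range L.length).map (fun i => L.getD i []) = L := by
  apply List.ext_getElem
  · simp
  · intro i h1 h2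
    simp only [List.getElem_map, List.getElem_range]
    rw [List.getD_eq_getElem L [] (by simpa using h2)]

-- A's bucketing loop fills layer i with exactly the nodes of depth i, in order
lemma pvBucket (dep : PySem.Dict String Int) :
    ∀ (names : List String) (L : List (List String)),
      (∀ n ∈ names, (dep.getD n 0).toNat < L.length) →
      names.foldl (pvBucketStepA dep) L
        = (List.range L.length).map
            (fun i => L.getD i [] ++ names.filter (fun n => (dep.getD n 0).toNat == i)) := by
  intro names
  induction names with
  | nil =>
      intro L _
      simp only [List.foldl_nil, List.filter_nil, List.append_nil]
      exact (pvSelf_map_range L).symm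
  | cons n names' ih =>
      intro L hrange
      simp only [List.foldl_cons]
      have hj : (dep.getD n 0).toNat < L.length := hrange n List.mem_cons_self
      have hstep : pvBucketStepA dep L n
          = L.set (dep.getD n 0).toNat (L.getD (dep.getD n 0).toNat [] ++ [n]) := rfl
      rw [hstep]
      have hlen : (L.set (dep.getD n 0).toNat (L.getD (dep.getD n 0).toNat [] ++ [n])).length
          = L.length := List.length_set ..
      rw [ih _ (by rw [hlen]; exact fun m hm => hrange m (List.mem_cons_of_mem _ hm)), hlen]
      apply List.map_congr_left
      intro i hi
      have hiL : i < L.length := List.mem_range.mp hi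
      rw [List.getD_eq_getElem _ [] (by simpa using hiL),
        List.getD_eq_getElem _ [] hiL, List.getElem_set]
      by_cases hij : (dep.getD n 0).toNat = i
      · simp only [hij, if_true, List.filter_cons, beq_self_eq_true, if_true]
        rw [List.getD_eq_getElem _ [] (hij ▸ hj)]
        simp [hij, List.append_assoc]
      · have : ((dep.getD n 0).toNat == i) = false := by simpa using hij
        simp [hij, this, List.filter_cons]


lemma pvP_order {edges : List (String × String)} {order : List String}
    (hPre : Pre_parallel_layers edges order) {x : String} (hx : x ∈ order) :
    pvP edges order order x = pvD edges order x := by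
  unfold pvP
  rw [List.filter_eq_self.mpr
    (fun u hu => by simpa using (pvE_mem.mp (pvUpsL_mem.mp hu)).2.1)]
  exact (pvD_eq hPre hx).symm

-- the two final depth dicts are equal
lemma pvDicts_eq {edges : List (String × String)} {order : List String}
    (hPre : Pre_parallel_layers edges order) :
    order.foldl (pvDepthStepA (pvUpstream edges order)) PySem.Dict.empty
      = order.foldl (fun dep name =>
          pvRelax (dep.getD name 0 + 1) dep ((pvDownstream edges order).getD name []))
          (order.foldl (fun d n => d.insert n 0) PySem.Dict.empty) := by
  apply PySem.Dict.ext
  have hA := pvA_loop hPre order [] PySem.Dict.empty rfl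
    (by simp [pvEmpty_items, PySem.List.dedup_eq_ofList, PySem.Set.ofList_nil])
  have hB0 := pvB_init order [] PySem.Dict.empty
    (by simp [pvEmpty_items, PySem.List.dedup_eq_ofList, PySem.Set.ofList_nil])
  simp only [List.nil_append] at hB0
  have hB0' : (order.foldl (fun d n => d.insert n 0) PySem.Dict.empty).items
      = (PySem.List.dedup order).map (fun x => (x, pvP edges order [] x)) := by
    rw [hB0]
    exact List.map_congr_left (fun y _ => by rw [pvP_nil])
  have hB := pvB_loop hPre order [] _ rfl hB0'
  simp only [List.nil_append] at hB
  rw [hA, hB]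
  apply List.map_congr_left
  intro y hy
  rw [pvP_order hPre ((PySem.List.mem_dedup _ _).mp hy)]

-- ===== VERDICT (by name: the statement is the Claim_ definition above) =====
theorem parallel_layers_spec : Claim_equal_parallel_layers := by
  intro edges order _ hPre
  unfold Spec_parallel_layers parallel_layers parallel_layers_alt
  dsimp only
  by_cases hord : order = []
  · subst hord
    simp [pvEmpty_items]
  · rw [← pvDicts_eq hPre]
    have hA := pvA_loop hPre order [] PySem.Dict.empty rfl
      (by simp [pvEmpty_items, PySem.List.dedup_eq_ofList, PySem.Set.ofList_nil])
    set dep := order.foldl (pvDepthStepA (pvUpstream edges order)) PySem.Dict.empty with hdepdef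
    obtain ⟨m0, ms, hdd⟩ : ∃ m0 ms, PySem.List.dedup order = m0 :: ms := by
      cases h : PySem.List.dedup order with
      | nil => exact absurd ((pvDedup_eq_nil_iff order).mp h) hord
      | cons a t => exact ⟨a, t, rfl⟩
    have hgetD : ∀ n ∈ order, dep.getD n 0 = pvD edges order n := fun n hn =>
      pvShape_getD dep _ _ 0 hA (PySem.List.nodup_dedup _) ((PySem.List.mem_dedup _ _).mpr hn)
    have hvals : dep.values = pvD edges order m0 :: ms.map (pvD edges order) := by
      simp only [PySem.Dict.values, hA, hdd, List.map_map, List.map_cons, Function.comp_def]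
    set M : Int := (ms.map (pvD edges order)).foldl max (pvD edges order m0) with hMdef
    have hM0 : 0 ≤ M :=
      le_trans (pvD_nonneg edges order m0) (PySem.List.le_foldl_max _ _).1
    have hMle : ∀ n ∈ order, pvD edges order n ≤ M := by
      intro n hn
      have : n ∈ m0 :: ms := hdd ▸ (PySem.List.mem_dedup _ _).mpr hn
      rcases List.mem_cons.mp this with h | h
      · subst h; exact (PySem.List.le_foldl_max _ _).1
      · exact (PySem.List.le_foldl_max _ _).2 _ (List.mem_map.mpr ⟨n, h, rfl⟩)
    have hnonempty : dep.items.isEmpty = false := by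
      rw [hA, hdd]; rfl
    have hordne : order.isEmpty = false := by
      cases order with | nil => exact absurd rfl hord | cons a t => rfl
    simp only [hnonempty, hordne, Bool.false_eq_true, if_false, hvals]
    have hcast : M + 1 = ((M.toNat + 1 : Nat) : Int) := by omega
    rw [hcast, PySem.List.pyRange_zero_natCast, List.map_map, List.map_map]
    set K := M.toNat + 1 with hKdef
    have hL0 : (List.range K).map ((fun _ => ([] : List String)) ∘ (fun k : Nat => (k : Int)))
        = (List.range K).map (fun _ => ([] : List String)) := rfl
    rw [hL0]
    have hL0len : ((List.range K).map (fun _ => ([] : List String))).length = K := by simp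
    have hL0getD : ∀ i, ((List.range K).map (fun _ => ([] : List String))).getD i [] = [] := by
      intro i
      rcases Nat.lt_or_ge i K with h | h
      · rw [List.getD_eq_getElem _ [] (by simpa using h)]
        simp
      · rw [List.getD_eq_default _ [] (by simpa using h)]
    rw [pvBucket dep order _ (by
      rw [hL0len]
      intro n hn
      have := hgetD n hn
      have h2 := hMle n hn
      have h3 := pvD_nonneg edges order n
      omega)]
    rw [hL0len]
    apply List.map_congr_left
    intro i hi
    rw [hL0getD i, List.nil_append]
    apply List.filter_congr
    intro n hn
    rw [hgetD n hn]
    have h3 := pvD_nonneg edges order n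
    by_cases h : pvD edges order n = ((i : Nat) : Int)
    · have h2 : (pvD edges order n).toNat = i := by omega
      simp [h, h2, Function.comp_def]
    · have h2 : (pvD edges order n).toNat ≠ i := by omega
      simp [h, h2, Function.comp_def]
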